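-- pv_equiv track=rewrite | github.com/amitaysicherman/ReactEmbed | preprocessing/biopax_parser.py | elements_to_prot_mols
-- ===== SOURCE A (Python) =====
-- PROTEIN = "protein"
--
-- MOLECULE = "molecule"
--
-- def db_to_type(db_name):
--     proteins_data_bases = ["uniprot"]
--     molecules_data_bases = ["chebi", "pubchem compound", "guide to pharmacology"]
--     db_name = db_name.lower()
--     if db_name in proteins_data_bases:
--         return PROTEIN
--     elif db_name in molecules_data_bases:
--         return MOLECULE
--
-- def elements_to_prot_mols(elements, proteins_to_id, molecules_to_id):
--     proteins = []
--     molecules = []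
--     for db, db_id in elements:
--         type_ = db_to_type(db)
--         key = (db, db_id)
--         if type_ == PROTEIN:
--             if key not in proteins_to_id:
--                 proteins_to_id[key] = len(proteins_to_id)
--             proteins.append(proteins_to_id[key])
--         elif type_ == MOLECULE:
--             if key not in molecules_to_id:
--                 molecules_to_id[key] = len(molecules_to_id)
--             molecules.append(molecules_to_id[key])
--     return proteins, molecules
-- ===== SOURCE B (Python) =====
-- PROTEIN = "protein"
--
-- MOLECULE = "molecule"
--
-- def db_to_type(db_name):
--     proteins_data_bases = ["uniprot"]
--     molecules_data_bases = ["chebi", "pubchem compound", "guide to pharmacology"]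
--     db_name = db_name.lower()
--     if db_name in proteins_data_bases:
--         return PROTEIN
--     elif db_name in molecules_data_bases:
--         return MOLECULE
--
-- def _ids(keys, table):
--     # closed-form id assignment: each distinct new key (first-occurrence order,
--     # via dict.fromkeys) gets id len(table) + its rank, in one bulk update;
--     # then a single lookup pass produces the result.
--     new = [k for k in dict.fromkeys(keys) if k not in table]
--     base = len(table)
--     table.update((k, base + j) for j, k in enumerate(new))
--     return [table[k] for k in keys]
--
-- def elements_to_prot_mols(elements, proteins_to_id, molecules_to_id):
--     prot = [(db, db_id) for db, db_id in elements if db_to_type(db) == PROTEIN]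
--     mol = [(db, db_id) for db, db_id in elements if db_to_type(db) == MOLECULE]
--     return _ids(prot, proteins_to_id), _ids(mol, molecules_to_id)
-- ===== Notes on version B (the rewrite author's own statement) =====
-- stated objective: alternative
-- what changed: A's single loop interleaving classification with incremental id assignment is replaced by comprehension-based classification plus a closed-form id assignment: distinct new keys (dict.fromkeys order) get ids len(table)+rank in one bulk table.update, then one lookup pass emits the ids.
import Mathlib
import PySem

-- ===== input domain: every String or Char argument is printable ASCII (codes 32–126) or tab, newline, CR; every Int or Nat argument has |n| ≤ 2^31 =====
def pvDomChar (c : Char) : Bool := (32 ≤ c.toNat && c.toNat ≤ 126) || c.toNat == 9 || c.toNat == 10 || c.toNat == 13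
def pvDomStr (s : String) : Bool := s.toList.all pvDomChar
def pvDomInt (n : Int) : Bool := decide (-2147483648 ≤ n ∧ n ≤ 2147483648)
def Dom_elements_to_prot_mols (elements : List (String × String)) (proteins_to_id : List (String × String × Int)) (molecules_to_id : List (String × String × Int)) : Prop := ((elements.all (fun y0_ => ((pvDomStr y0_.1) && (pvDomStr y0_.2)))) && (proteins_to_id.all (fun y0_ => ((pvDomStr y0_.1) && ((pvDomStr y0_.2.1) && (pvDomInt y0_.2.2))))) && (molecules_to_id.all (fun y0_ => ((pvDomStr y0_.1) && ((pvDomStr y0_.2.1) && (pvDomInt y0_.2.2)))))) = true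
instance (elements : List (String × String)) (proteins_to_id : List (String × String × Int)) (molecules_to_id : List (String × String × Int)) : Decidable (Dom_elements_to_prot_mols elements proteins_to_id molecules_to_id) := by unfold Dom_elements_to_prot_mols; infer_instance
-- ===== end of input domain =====

-- B replaces A's single interleaved classify-and-index loop by comprehension-based classification
-- plus a closed-form id assignment (new distinct keys, deduplicated via dict.fromkeys, get ids
-- len(table)+rank in one bulk update, then one lookup pass); objective: alternative decomposition.
-- Equivalence is proved about the RETURN value; both Pythons also mutate the two dict arguments,
-- and B performs the same updates.

-- ===== PORT A =====
-- first-match lookup in the association list representing a Python dict keyed by (db, db_id)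
def pvLookup (d : List (String × String × Int)) (k : String × String) : Option Int :=
  match d with
  | [] => none
  | (a, b, v) :: rest => if a = k.1 ∧ b = k.2 then some v else pvLookup rest k

def db_to_type (db_name : String) : Option String :=
  let proteins_data_bases := ["uniprot"]
  let molecules_data_bases := ["chebi", "pubchem compound", "guide to pharmacology"]
  let db_name := PySem.Str.lower db_name
  if db_name ∈ proteins_data_bases then some "protein"
  else if db_name ∈ molecules_data_bases then some "molecule"
  else none

def goA (elements : List (String × String)) (p m : List (String × String × Int)) :
    List Int × List Int :=
  match elements with
  | [] => ([], [])
  | (db, db_id) :: rest =>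
    let type_ := db_to_type db
    let key := (db, db_id)
    if type_ = some "protein" then
      let p' := if (pvLookup p key).isSome then p else p ++ [(db, db_id, (p.length : Int))]
      let r := goA rest p' m
      (((pvLookup p' key).getD 0) :: r.1, r.2)
    else if type_ = some "molecule" then
      let m' := if (pvLookup m key).isSome then m else m ++ [(db, db_id, (m.length : Int))]
      let r := goA rest p m'
      (r.1, ((pvLookup m' key).getD 0) :: r.2)
    else goA rest p m

def elements_to_prot_mols (elements : List (String × String)) (proteins_to_id : List (String × String × Int)) (molecules_to_id : List (String × String × Int)) : List Int × List Int :=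
  goA elements proteins_to_id molecules_to_id

-- ===== PORT B =====
-- dict.fromkeys(keys) keeps each key once, in first-occurrence order; this recursion is exact for
-- that (head kept, later occurrences filtered out of the tail)
def pyDedup (l : List (String × String)) : List (String × String) :=
  match l with
  | [] => []
  | k :: r => k :: pyDedup (r.filter (fun k' => k' ≠ k))
termination_by l.length
decreasing_by
  simp only [List.length_cons, List.length_unattach]
  exact Nat.lt_succ_of_le (le_trans (List.length_filter_le _ _) (by simp))

-- the generator (k, base + j) for j, k in enumerate(new): new keys with consecutive ids from n
def withIdsB (n : Int) (new : List (String × String)) : List (String × String × Int) :=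
  match new with
  | [] => []
  | k :: r => (k.1, k.2, n) :: withIdsB (n + 1) r

-- _ids: new = the distinct keys absent from table; table.update gives them offset ids in bulk
-- (`full` is the updated table); the result is one lookup pass over keys
def idsB (keys : List (String × String)) (table : List (String × String × Int)) : List Int :=
  let new := (pyDedup keys).filter (fun k => (pvLookup table k).isNone)
  let full := table ++ withIdsB (table.length : Int) new
  keys.map (fun k => (pvLookup full k).getD 0)

def elements_to_prot_mols_alt (elements : List (String × String)) (proteins_to_id : List (String × String × Int)) (molecules_to_id : List (String × String × Int)) : List Int × List Int :=
  let prot := elements.filter (fun e => db_to_type e.1 = some "protein")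
  let mol := elements.filter (fun e => db_to_type e.1 = some "molecule")
  (idsB prot proteins_to_id, idsB mol molecules_to_id)

-- ===== PRECONDITION & SPEC =====
-- Pre_ excludes association lists carrying a duplicated (db, db_id) key: such a list represents no
-- Python dict (a dict collapses duplicates), so first-match lookup would not match A's behaviour.
def Pre_elements_to_prot_mols (elements : List (String × String)) (proteins_to_id : List (String × String × Int)) (molecules_to_id : List (String × String × Int)) : Prop :=
  (proteins_to_id.map (fun e => (e.1, e.2.1))).Nodup ∧
  (molecules_to_id.map (fun e => (e.1, e.2.1))).Nodup
instance (elements : List (String × String)) (proteins_to_id : List (String × String × Int)) (molecules_to_id : List (String × String × Int)) : Decidable (Pre_elements_to_prot_mols elements proteins_to_id molecules_to_id) := by unfold Pre_elements_to_prot_mols; infer_instance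

def pvWitness_elements_to_prot_mols : (List (String × String)) × (List (String × String × Int)) × (List (String × String × Int)) :=
  ([("uniprot", "P1"), ("chebi", "C1"), ("uniprot", "P1")], [("uniprot", "P0", 0)], [])

def Spec_elements_to_prot_mols (elements : List (String × String)) (proteins_to_id : List (String × String × Int)) (molecules_to_id : List (String × String × Int)) (out : List Int × List Int) : Prop := out = elements_to_prot_mols_alt elements proteins_to_id molecules_to_id
instance (elements : List (String × String)) (proteins_to_id : List (String × String × Int)) (molecules_to_id : List (String × String × Int)) (out : List Int × List Int) : Decidable (Spec_elements_to_prot_mols elements proteins_to_id molecules_to_id out) := by unfold Spec_elements_to_prot_mols; infer_instance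

-- ===== CLAIM (what is proved, stated in full; the proofs are below) =====
def Claim_equal_elements_to_prot_mols : Prop := ∀ (elements : List (String × String)) (proteins_to_id : List (String × String × Int)) (molecules_to_id : List (String × String × Int)), Dom_elements_to_prot_mols elements proteins_to_id molecules_to_id → Pre_elements_to_prot_mols elements proteins_to_id molecules_to_id → Spec_elements_to_prot_mols elements proteins_to_id molecules_to_id (elements_to_prot_mols elements proteins_to_id molecules_to_id)

-- ===== LEMMAS AND PROOFS =====

-- proof-only helper: the sequential indexer (emit-as-you-go), the shape A's loop has per class
def indexSeq (keys : List (String × String)) (table : List (String × String × Int)) : List Int :=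
  match keys with
  | [] => []
  | key :: rest =>
    if (pvLookup table key).isSome then
      ((pvLookup table key).getD 0) :: indexSeq rest table
    else
      ((table.length : Int)) :: indexSeq rest (table ++ [(key.1, key.2, (table.length : Int))])

theorem pvLookup_append (t u : List (String × String × Int)) (k : String × String) :
    pvLookup (t ++ u) k =
      (match pvLookup t k with | some v => some v | none => pvLookup u k) := by
  induction t with
  | nil => simp [pvLookup]
  | cons hd tl ih =>
    obtain ⟨a, b, v⟩ := hd
    by_cases h : a = k.1 ∧ b = k.2 <;> simp [pvLookup, h, ih]

theorem pvLookup_self_append (t : List (String × String × Int)) (k : String × String)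
    (v : Int) (h : pvLookup t k = none) :
    pvLookup (t ++ [(k.1, k.2, v)]) k = some v := by
  rw [pvLookup_append, h]
  simp [pvLookup]

theorem pyDedup_filter (p : (String × String) → Bool) (l : List (String × String)) :
    pyDedup (l.filter p) = (pyDedup l).filter p := by
  induction hn : l.length using Nat.strong_induction_on generalizing l with
  | _ n ih =>
  match l with
  | [] => simp [pyDedup]
  | k :: r =>
    have hlt : ∀ q : (String × String) → Bool, (r.filter q).length < n := by
      intro q; rw [← hn]
      simpa using Nat.lt_succ_of_le (List.length_filter_le q r)
    have h1 := ih _ (hlt (fun k' => k' ≠ k)) (r.filter (fun k' => k' ≠ k)) rfl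
    by_cases hk : p k
    · calc pyDedup ((k :: r).filter p)
          = k :: pyDedup ((r.filter p).filter (fun k' => k' ≠ k)) := by simp [pyDedup, hk]
        _ = k :: pyDedup ((r.filter (fun k' => k' ≠ k)).filter p) := by rw [List.filter_comm]
        _ = k :: (pyDedup (r.filter (fun k' => k' ≠ k))).filter p := by rw [h1]
        _ = (pyDedup (k :: r)).filter p := by simp [pyDedup, hk]
    · have h2 : (r.filter (fun k' => k' ≠ k)).filter p = r.filter p := by
        rw [List.filter_comm]
        apply List.filter_eq_self.2
        intro a ha
        have hpa : p a = true := (List.mem_filter.1 ha).2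
        by_cases hak : a = k
        · exact absurd (hak ▸ hpa) hk
        · simp [hak]
      calc pyDedup ((k :: r).filter p)
          = pyDedup (r.filter p) := by simp [hk]
        _ = pyDedup ((r.filter (fun k' => k' ≠ k)).filter p) := by rw [h2]
        _ = (pyDedup (r.filter (fun k' => k' ≠ k))).filter p := h1
        _ = (pyDedup (k :: r)).filter p := by simp [pyDedup, hk]

-- core lemma: the sequential indexer equals B's closed-form id assignment
theorem indexSeq_eq_idsB (keys : List (String × String)) (t : List (String × String × Int)) :
    indexSeq keys t = idsB keys t := by
  induction keys generalizing t with
  | nil => simp [indexSeq, idsB]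
  | cons k rest ih =>
    cases hv : pvLookup t k with
    | some v =>
      have hnewEq : (pyDedup (rest.filter (fun k' => k' ≠ k))).filter
            (fun k' => (pvLookup t k').isNone) =
          (pyDedup rest).filter (fun k' => (pvLookup t k').isNone) := by
        rw [pyDedup_filter, List.filter_comm]
        apply List.filter_eq_self.2
        intro a ha
        have hna := (List.mem_filter.1 ha).2
        by_cases hak : a = k
        · subst hak; rw [hv] at hna; simp at hna
        · simp [hak]
      have hfullk : pvLookup (t ++ withIdsB (t.length : Int)
          ((pyDedup rest).filter (fun k' => (pvLookup t k').isNone))) k = some v := by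
        rw [pvLookup_append, hv]
      have lhs : indexSeq (k :: rest) t = v :: idsB rest t := by
        simp [indexSeq, hv, ih]
      have rhs : idsB (k :: rest) t = v :: idsB rest t := by
        simp only [ne_eq, decide_not] at hnewEq
        simp [idsB, pyDedup, hv, hnewEq, hfullk]
      rw [lhs, rhs]
    | none =>
      have hlookt' : ∀ k', pvLookup (t ++ [(k.1, k.2, (t.length : Int))]) k' =
          (match pvLookup t k' with
           | some v => some v
           | none => if k.1 = k'.1 ∧ k.2 = k'.2 then some (t.length : Int) else none) := by
        intro k'; rw [pvLookup_append]; cases pvLookup t k' <;> simp [pvLookup]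
      have hnewEq : (pyDedup rest).filter
            (fun k' => (pvLookup (t ++ [(k.1, k.2, (t.length : Int))]) k').isNone) =
          (pyDedup (rest.filter (fun k' => k' ≠ k))).filter
            (fun k' => (pvLookup t k').isNone) := by
        conv_rhs => rw [pyDedup_filter, List.filter_comm, List.filter_filter]
        apply List.filter_congr
        intro a _
        rw [hlookt' a]
        cases hta : pvLookup t a with
        | some w => simp
        | none =>
          by_cases hak : a = k
          · subst hak; simp
          · have hne : ¬(k.1 = a.1 ∧ k.2 = a.2) := by
              rintro ⟨h1', h2'⟩
              exact hak (Prod.ext h1'.symm h2'.symm)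
            simp [hne, hak]
      have key_head : pvLookup (t ++ [(k.1, k.2, (t.length : Int))]) k =
          some (t.length : Int) := by
        rw [pvLookup_append, hv]; simp [pvLookup]
      have hfull : (t ++ [(k.1, k.2, (t.length : Int))]) ++
            withIdsB (((t ++ [(k.1, k.2, (t.length : Int))]).length : Int))
              ((pyDedup rest).filter
                (fun k' => (pvLookup (t ++ [(k.1, k.2, (t.length : Int))]) k').isNone)) =
          t ++ withIdsB (t.length : Int)
            ((pyDedup (k :: rest)).filter (fun k' => (pvLookup t k').isNone)) := by
        rw [hnewEq]
        simp only [pyDedup, List.filter_cons, hv, Option.isNone_none, if_true,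
          List.length_append, List.length_cons, List.length_nil, withIdsB,
          List.append_assoc, List.singleton_append]
        norm_num
      have lhs : indexSeq (k :: rest) t =
          (t.length : Int) :: idsB rest (t ++ [(k.1, k.2, (t.length : Int))]) := by
        simp [indexSeq, hv, ih]
      have rhs : idsB (k :: rest) t =
          (t.length : Int) :: idsB rest (t ++ [(k.1, k.2, (t.length : Int))]) := by
        simp only [idsB, List.map_cons]
        rw [← hfull, pvLookup_append, key_head]
        simp
      rw [lhs, rhs]

-- A's interleaved loop equals per-class sequential indexing over the filtered element lists
theorem goA_eq_filter_indexSeq (elements : List (String × String))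
    (p m : List (String × String × Int)) :
    goA elements p m =
      (indexSeq (elements.filter (fun e => db_to_type e.1 = some "protein")) p,
       indexSeq (elements.filter (fun e => db_to_type e.1 = some "molecule")) m) := by
  induction elements generalizing p m with
  | nil => simp [goA, indexSeq]
  | cons hd tl ih =>
    obtain ⟨db, db_id⟩ := hd
    by_cases hp : db_to_type db = some "protein"
    · by_cases hf : (pvLookup p (db, db_id)).isSome
      · simp [goA, hp, hf, indexSeq, ih]
      · have hself := pvLookup_self_append p (db, db_id) (p.length : Int)
          (Option.not_isSome_iff_eq_none.1 hf)
        simp [goA, hp, hf, indexSeq, ih, hself]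
    · by_cases hm : db_to_type db = some "molecule"
      · by_cases hf : (pvLookup m (db, db_id)).isSome
        · simp [goA, hm, hf, indexSeq, ih]
        · have hself := pvLookup_self_append m (db, db_id) (m.length : Int)
            (Option.not_isSome_iff_eq_none.1 hf)
          simp [goA, hm, hf, indexSeq, ih, hself]
      · simp [goA, hp, hm, ih]

-- ===== VERDICT (by name: the statement is the Claim_ definition above) =====
theorem elements_to_prot_mols_spec : Claim_equal_elements_to_prot_mols := by
  intro elements p m _ _
  unfold Spec_elements_to_prot_mols elements_to_prot_mols elements_to_prot_mols_alt
  rw [goA_eq_filter_indexSeq, indexSeq_eq_idsB, indexSeq_eq_idsB]
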